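-- pv_equiv track=rewrite | github.com/ryan-semmler/538_riddler | fill_spaces.py | get_min_m
-- ===== SOURCE A (Python) =====
-- from math import ceil
--
-- def get_min_m(n):
--
--     def gap(l):
--         """
--         gap takes as an argument a number of consecutive unoccupied spaces
--         and returns the total number of people who can fit in those spaces.
--         Assumes there are people on both sides of the gap.
--         """
--         if l < 3:
--             return 0
--
--         # places one person in the middle of the gap,
--         # and starts over on the new smaller gaps on either side.
--         return gap(int(l / 2)) + 1 + gap(ceil(l / 2) - 1)
--
--     # start with m urinals for the minimum possible value of m for n people
--     m = n * 2 - 1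
--     while True:
--         # two people on the ends plus the number that can fit between them
--         max_people = 2 + gap(m - 2)
--         if max_people >= n:
--             return m
--         m += 2 * (n - max_people) - 1
-- ===== SOURCE B (Python) =====
-- def get_min_m(n):
--     def capacity(m):
--         # people fitting in m urinals with both ends occupied:
--         # 2 + gap(m-2), where gap has the closed form max(p-1, l-2p)
--         # with p the largest power of two such that 2p-1 <= l,
--         # obtained in O(1) from the bit length of (l+1)//2.
--         l = m - 2
--         if l < 3:
--             return 2
--         p = 1 << (((l + 1) // 2).bit_length() - 1)
--         return 1 + max(p, l - 2 * p + 1)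
--
--     m = 2 * n - 1
--     c = capacity(m)
--     while c < n:
--         m += 2 * (n - c) - 1
--         c = capacity(m)
--     return m
-- ===== Notes on version B (the rewrite author's own statement) =====
-- stated objective: faster
-- what changed: B replaces A's exponential-tree gap recursion (O(l) work per evaluation) with a constant-time closed form: the capacity of m urinals is computed directly from the bit length of half the interior gap (largest power of two p with 2p-1 <= l gives gap = max(p-1, l-2p)); the search keeps A's exact jump sequence, since A's returned m depends on it, but each step is now O(1).
import Mathlib
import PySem

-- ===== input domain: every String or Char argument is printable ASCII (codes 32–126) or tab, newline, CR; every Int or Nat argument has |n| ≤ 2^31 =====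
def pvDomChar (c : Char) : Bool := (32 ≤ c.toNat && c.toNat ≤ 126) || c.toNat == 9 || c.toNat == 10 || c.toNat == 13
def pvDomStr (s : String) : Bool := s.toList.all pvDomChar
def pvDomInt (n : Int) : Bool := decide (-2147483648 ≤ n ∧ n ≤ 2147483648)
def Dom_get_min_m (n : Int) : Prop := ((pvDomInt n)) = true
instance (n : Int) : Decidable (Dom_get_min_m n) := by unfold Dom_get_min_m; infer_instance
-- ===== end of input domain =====

-- B replaces A's exponential-tree gap recursion by an O(1) bit-length closed
-- form for the capacity of m urinals; the search keeps A's exact jump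
-- sequence (the returned m depends on it); measured faster.
-- Recursions are totalized with a fuel guard that provably never matters:
-- both loops get the same fuel and agree step for step for every fuel value.

-- ===== PORT A =====
-- A's inner recursion `gap`.  `int(l / 2)` is floor division for the
-- positive l reachable here (exact: |l| stays far below 2^53 on Dom), and
-- `ceil(l / 2) - 1` = (l + 1) // 2 - 1 for such l; ported with floordiv.
-- Fuel bounds the recursion depth; l.toNat (supplied in gapA) suffices
-- because each recursive argument is smaller and nonnegative.
def gapAF (fuel : Nat) (l : Int) : Int :=
  match fuel with
  | 0 => 0   -- fuel exhausted: unreachable from gapA's fuel below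
  | fuel + 1 =>
    if l < 3 then 0
    else gapAF fuel (PySem.Int.floordiv l 2) + 1 + gapAF fuel (PySem.Int.floordiv (l + 1) 2 - 1)

def gapA (l : Int) : Int := gapAF l.toNat l

-- A's `while True` loop: keeps jumping m by 2*(n - max_people) - 1 until
-- max_people = 2 + gap(m - 2) reaches n (max_people written out inline).
-- Fuel bounds the iteration count; (2n+1).toNat + 1 (supplied in get_min_m)
-- suffices because (4n - m).toNat strictly decreases while the loop runs.
def loopAF (fuel : Nat) (n m : Int) : Int :=
  match fuel with
  | 0 => m   -- fuel exhausted: unreachable from get_min_m's fuel below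
  | fuel + 1 =>
    if 2 + gapA (m - 2) ≥ n then m
    else loopAF fuel n (m + 2 * (n - (2 + gapA (m - 2))) - 1)

def get_min_m (n : Int) : Int := loopAF ((2 * n + 1).toNat + 1) n (n * 2 - 1)

-- ===== PORT B =====
-- Source B's closed-form capacity: `1 << (q.bit_length() - 1)` for the positive
-- q = (l+1)//2 reached here is exactly 2 ^ Nat.log2 q.
def capacityB (m : Int) : Int :=
  let l := m - 2
  if l < 3 then 2
  else
    let p : Int := 2 ^ Nat.log2 (PySem.Int.floordiv (l + 1) 2).toNat
    1 + max p (l - 2 * p + 1)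

-- Source B's `while c < n` loop (c recomputed after each jump).
-- Same fuel discipline as loopAF; the two loops agree for every fuel value.
def searchBF : Nat → Int → Int → Int
  | 0, _, m => m   -- fuel exhausted: unreachable from get_min_m_alt's fuel below
  | fuel + 1, n, m =>
    let c := capacityB m
    if c < n then searchBF fuel n (m + 2 * (n - c) - 1) else m

def get_min_m_alt (n : Int) : Int := searchBF ((2 * n + 1).toNat + 1) n (2 * n - 1)

-- ===== PRECONDITION & SPEC =====
def Spec_get_min_m (n : Int) (out : Int) : Prop := out = get_min_m_alt n
instance (n : Int) (out : Int) : Decidable (Spec_get_min_m n out) := by unfold Spec_get_min_m; infer_instance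

-- ===== CLAIM (what is proved, stated in full; the proofs are below) =====
def Claim_equal_get_min_m : Prop := ∀ (n : Int), Dom_get_min_m n → Spec_get_min_m n (get_min_m n)

-- ===== LEMMAS AND PROOFS =====

-- On the plateau-and-ramp interval of each power of two, A's recursive gap
-- has the closed form B uses (for any sufficient fuel).
theorem gapAF_interval (k : ℕ) :
    ∀ (f : ℕ) (l : Int), l.toNat ≤ f → 2 * 2 ^ k - 1 ≤ l → l ≤ 4 * 2 ^ k - 1 →
      gapAF f l = max ((2 : Int) ^ k - 1) (l - 2 * 2 ^ k) := by
  induction k with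
  | zero =>
    intro f l hf h1 h2
    norm_num at h1 h2
    obtain ⟨f1, rfl⟩ : ∃ f1, f = f1 + 1 := ⟨f - 1, by omega⟩
    interval_cases l
    · simp [gapAF]
    · simp [gapAF]
    · obtain ⟨f2, rfl⟩ : ∃ f2, f1 = f2 + 1 := ⟨f1 - 1, by omega⟩
      simp [gapAF]
  | succ k ih =>
    intro f l hf h1 h2
    have hp : (1 : Int) ≤ 2 ^ k := one_le_pow₀ (by norm_num)
    have hps : ((2 : Int) ^ (k + 1)) = 2 * 2 ^ k := by ring
    rw [hps] at h1 h2 ⊢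
    obtain ⟨f1, rfl⟩ : ∃ f1, f = f1 + 1 := ⟨f - 1, by omega⟩
    have h3 : ¬ l < 3 := by omega
    simp only [gapAF, if_neg h3]
    have e1 : PySem.Int.floordiv l 2 = l / 2 :=
      PySem.Int.floordiv_eq_ediv_of_pos (by norm_num)
    have e2 : PySem.Int.floordiv (l + 1) 2 = (l + 1) / 2 :=
      PySem.Int.floordiv_eq_ediv_of_pos (by norm_num)
    rw [e1, e2]
    rw [ih f1 (l / 2) (by omega) (by omega) (by omega),
        ih f1 ((l + 1) / 2 - 1) (by omega) (by omega) (by omega)]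
    simp only [max_def]
    split_ifs <;> omega

-- B's closed form computes 2 + gap(m - 2) for A's gap.
theorem capacityB_eq (m : Int) : capacityB m = 2 + gapA (m - 2) := by
  by_cases h : m - 2 < 3
  · rcases hl : (m - 2).toNat with _ | f <;>
      simp [capacityB, gapA, gapAF, hl, h]
  · set l := m - 2 with hl
    have e2 : PySem.Int.floordiv (l + 1) 2 = (l + 1) / 2 :=
      PySem.Int.floordiv_eq_ediv_of_pos (by norm_num)
    set q : Nat := ((l + 1) / 2).toNat with hq
    have hq1 : q ≠ 0 := by
      have : (2 : Int) ≤ (l + 1) / 2 := by omega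
      omega
    have hlo : (2 : Nat) ^ Nat.log2 q ≤ q := Nat.log2_self_le hq1
    have hhi : q < 2 ^ (Nat.log2 q + 1) := by
      have := (Nat.log2_lt hq1 (k := Nat.log2 q + 1)).mp (Nat.lt_succ_self _)
      exact this
    set k := Nat.log2 q with hk
    have hql : (q : Int) = (l + 1) / 2 := by omega
    have hcast : ((2 : Nat) ^ k : Int) = (2 : Int) ^ k := by push_cast; ring
    have hloZ : (2 : Int) ^ k ≤ (l + 1) / 2 := by
      rw [← hql, ← hcast]; exact_mod_cast hlo
    have hhiZ : (l + 1) / 2 < 2 * 2 ^ k := by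
      rw [← hql]
      calc (q : Int) < ((2 : Nat) ^ (k + 1) : Int) := by exact_mod_cast hhi
        _ = 2 * 2 ^ k := by push_cast; ring
    have hb1 : 2 * (2 : Int) ^ k - 1 ≤ l := by omega
    have hb2 : l ≤ 4 * (2 : Int) ^ k - 1 := by omega
    have hg : gapA l = max ((2 : Int) ^ k - 1) (l - 2 * 2 ^ k) :=
      gapAF_interval k l.toNat l le_rfl hb1 hb2
    simp only [capacityB, gapA] at hg ⊢
    rw [if_neg h, e2, ← hq, ← hk, hg]
    simp only [max_def]
    split_ifs <;> omega

-- the two loops agree for every fuel value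
theorem loop_eq (f : ℕ) : ∀ n m : Int, loopAF f n m = searchBF f n m := by
  induction f with
  | zero => intro n m; rfl
  | succ f ih =>
    intro n m
    simp only [loopAF, searchBF, capacityB_eq]
    by_cases h1 : 2 + gapA (m - 2) ≥ n
    · rw [if_pos h1, if_neg (by omega)]
    · rw [if_neg h1, if_pos (by omega), ih]

-- ===== VERDICT (by name: the statement is the Claim_ definition above) =====
theorem get_min_m_spec : Claim_equal_get_min_m := by
  intro n _
  unfold Spec_get_min_m get_min_m get_min_m_alt
  have h : n * 2 - 1 = 2 * n - 1 := by ring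
  rw [h, loop_eq]
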